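-- pv_equiv track=rewrite | github.com/SamuelHutchinson/advent-of-code-2025 | day_6/day_6.py | solve
-- ===== SOURCE A (Python) =====
-- def solve(input_text: str) -> int:
--     """Solve Day 6 Part 1: Numbers read horizontally, space-separated."""
--     lines = input_text.strip().split('\n')
--     rows = [line.split() for line in lines]
--     columns = list(zip(*rows))
--
--     grand_total = 0
--     for column in columns:
--         operator = column[-1]
--         numbers = [int(n) for n in column[:-1]]
--
--         if operator == '+':
--             grand_total += sum(numbers)
--         elif operator == '*':
--             product = 1
--             for num in numbers:
--                 product *= num
--             grand_total += product
--
--     return grand_total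
-- ===== SOURCE B (Python) =====
-- def solve(input_text: str) -> int:
--     """Solve Day 6 Part 1: Numbers read horizontally, space-separated."""
--     rows = [line.split() for line in input_text.strip().split('\n')]
--     op_row = rows[-1]
--     num_rows = rows[:-1]
--     m = min(len(r) for r in rows)
--     ops = op_row[:m]
--     acc = [0 if op == '+' else 1 for op in ops]
--     for row in num_rows:
--         vals = [int(x) for x in row[:m]]
--         acc = [a + v if op == '+' else a * v if op == '*' else a
--                for a, v, op in zip(acc, vals, ops)]
--     return sum(a for a, op in zip(acc, ops) if op == '+' or op == '*')
-- ===== Notes on version B (the rewrite author's own statement) =====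
-- stated objective: alternative
-- what changed: B drops the zip(*rows) transpose entirely: it treats the last line as the operator row, seeds one accumulator per column (0 for '+', 1 for '*'), folds the number rows top-to-bottom updating each column's accumulator in place, and finally sums the accumulators of '+'/'*' columns (column count capped at the minimum row length to match zip truncation).
import Mathlib
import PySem

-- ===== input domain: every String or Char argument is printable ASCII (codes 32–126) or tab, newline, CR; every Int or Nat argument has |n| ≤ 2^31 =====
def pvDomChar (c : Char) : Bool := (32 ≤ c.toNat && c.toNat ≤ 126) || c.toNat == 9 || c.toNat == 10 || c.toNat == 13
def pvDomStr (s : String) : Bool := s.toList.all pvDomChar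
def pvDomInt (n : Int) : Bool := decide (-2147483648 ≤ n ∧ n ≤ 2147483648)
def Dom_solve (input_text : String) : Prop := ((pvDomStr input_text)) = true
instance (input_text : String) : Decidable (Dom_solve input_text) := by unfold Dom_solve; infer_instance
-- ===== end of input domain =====

-- B replaces the zip(*rows) transpose by per-column accumulators (seeded 0 for '+', 1 for '*')
-- folded over the number rows top-to-bottom; objective: alternative decomposition, same cost.
-- Pre_solve excludes exactly the inputs where Python raises ValueError (a non-integer token in
-- a number-row column that zip keeps); both Pythons raise there.

-- ===== PORT A =====
-- zip(*rows): exact — truncates to the shortest row, column j collects rows[i][j]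
def pyZipStar (rows : List (List String)) : List (List String) :=
  (List.range (((rows.map List.length).min?).getD 0)).map
    (fun j => rows.map (fun r => r.getD j ""))

def solve (input_text : String) : Int :=
  let lines := (PySem.Str.split? (PySem.Str.strip input_text) "\n").getD []
  let rows := lines.map PySem.Str.split₀
  let columns := pyZipStar rows
  columns.foldl (fun grand_total column =>
    let operator := (column.getLast?).getD ""
    -- int(n): exact under Pre_solve (ofStr? is some there); getD 0 is never taken inside Pre_
    let numbers := column.dropLast.map (fun n => (PySem.Int.ofStr? n).getD 0)
    if operator = "+" then grand_total + numbers.sum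
    else if operator = "*" then grand_total + numbers.foldl (· * ·) 1
    else grand_total) 0

-- ===== PORT B =====
def stepCell (op : String) (a v : Int) : Int :=
  if op = "+" then a + v else if op = "*" then a * v else a

-- the zip3 comprehension updating the accumulators with one row of values
def stepRow : List Int → List Int → List String → List Int
  | a :: as, v :: vs, op :: ops => stepCell op a v :: stepRow as vs ops
  | _, _, _ => []

def solve_alt (input_text : String) : Int :=
  let rows := ((PySem.Str.split? (PySem.Str.strip input_text) "\n").getD []).map PySem.Str.split₀
  let opRow := (rows.getLast?).getD []
  let numRows := rows.dropLast
  let m := ((rows.map List.length).min?).getD 0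
  let ops := opRow.take m
  let init := ops.map (fun op => if op = "+" then (0 : Int) else 1)
  let acc := numRows.foldl
      (fun a row => stepRow a ((row.take m).map (fun x => (PySem.Int.ofStr? x).getD 0)) ops) init
  (((acc.zip ops).filter (fun p => p.2 == "+" || p.2 == "*")).map Prod.fst).sum

-- ===== PRECONDITION & SPEC =====
-- Pre_solve excludes exactly the inputs on which Python A raises ValueError: some token in a
-- number row, at a column index the zip truncation keeps, is not accepted by int().
def Pre_solve (input_text : String) : Prop :=
  let rows := ((PySem.Str.split? (PySem.Str.strip input_text) "\n").getD []).map PySem.Str.split₀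
  let m := ((rows.map List.length).min?).getD 0
  ∀ r ∈ rows.dropLast, ∀ s ∈ r.take m, (PySem.Int.ofStr? s).isSome = true
instance (input_text : String) : Decidable (Pre_solve input_text) := by
  unfold Pre_solve; infer_instance

def pvWitness_solve : String := "1 2\n3 4\n+ *"

def Spec_solve (input_text : String) (out : Int) : Prop := out = solve_alt input_text
instance (input_text : String) (out : Int) : Decidable (Spec_solve input_text out) := by
  unfold Spec_solve; infer_instance

-- ===== CLAIM (what is proved, stated in full; the proofs are below) =====
def Claim_equal_solve : Prop := ∀ (input_text : String), Dom_solve input_text →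
  Pre_solve input_text → Spec_solve input_text (solve input_text)

-- ===== LEMMAS AND PROOFS =====

-- the per-column value A adds for operator `op` over the column's number cells
def colVal (op : String) (cells : List Int) : Int :=
  if op = "+" then cells.sum else if op = "*" then cells.foldl (· * ·) 1 else 0

theorem stepRow_length (a : List Int) (v : List Int) (ops : List String) :
    (stepRow a v ops).length = min a.length (min v.length ops.length) := by
  induction a generalizing v ops with
  | nil => cases v <;> cases ops <;> simp [stepRow]
  | cons x xs ih =>
    cases v <;> cases ops <;> simp [stepRow, ih]

theorem stepRow_getD (a v : List Int) (ops : List String) (j : Nat)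
    (hj : j < a.length) (h1 : a.length ≤ v.length) (h2 : a.length ≤ ops.length) :
    (stepRow a v ops).getD j 0 = stepCell (ops.getD j "") (a.getD j 0) (v.getD j 0) := by
  induction a generalizing v ops j with
  | nil => simp at hj
  | cons x xs ih =>
    cases v with
    | nil => simp at h1
    | cons y ys =>
      cases ops with
      | nil => simp at h2
      | cons o os =>
        cases j with
        | zero => simp [stepRow]
        | succ j =>
          simp only [stepRow, List.getD_cons_succ]
          exact ih ys os j (by simpa using hj) (by simpa using h1) (by simpa using h2)

-- the accumulator fold, read at one index, is the column-wise fold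
theorem stepRows_getD (rs : List (List Int)) :
    ∀ (a : List Int) (ops : List String) (j : Nat),
      a.length = ops.length → (∀ r ∈ rs, a.length ≤ r.length) → j < a.length →
      (rs.foldl (fun a' vals => stepRow a' vals ops) a).getD j 0
        = (rs.map (fun r => r.getD j 0)).foldl (fun x y => stepCell (ops.getD j "") x y) (a.getD j 0) := by
  induction rs with
  | nil => intro a ops j _ _ _; simp
  | cons r rs ih =>
    intro a ops j hlen hr hj
    have hra : a.length ≤ r.length := hr r (by simp)
    have hlen' : (stepRow a r ops).length = a.length := by
      rw [stepRow_length]; omega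
    simp only [List.foldl_cons, List.map_cons]
    rw [ih (stepRow a r ops) ops j (by omega)
        (fun r' hr' => by rw [hlen']; exact hr r' (by simp [hr']))
        (by omega)]
    rw [stepRow_getD a r ops j hj hra (by omega)]

theorem stepRows_length (rs : List (List Int)) :
    ∀ (a : List Int) (ops : List String),
      a.length = ops.length → (∀ r ∈ rs, a.length ≤ r.length) →
      (rs.foldl (fun a' vals => stepRow a' vals ops) a).length = a.length := by
  induction rs with
  | nil => intro a ops _ _; simp
  | cons r rs ih =>
    intro a ops hlen hr
    have hra : a.length ≤ r.length := hr r (by simp)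
    have hlen' : (stepRow a r ops).length = a.length := by
      rw [stepRow_length]; omega
    simp only [List.foldl_cons]
    rw [ih (stepRow a r ops) ops (by omega)
        (fun r' hr' => by rw [hlen']; exact hr r' (by simp [hr'])), hlen']

-- B's final filtered zip-sum as a sum over indices
theorem zipFilterSum (ops : List String) :
    ∀ (acc : List Int), acc.length = ops.length →
      ((((acc.zip ops).filter (fun p => p.2 == "+" || p.2 == "*")).map Prod.fst).sum : Int)
        = ((List.range ops.length).map
            (fun j => if ops.getD j "" = "+" ∨ ops.getD j "" = "*" then acc.getD j 0 else 0)).sum := by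
  induction ops with
  | nil => intro acc h; rw [List.length_eq_zero_iff.mp h]; simp
  | cons o os ih =>
    intro acc h
    cases acc with
    | nil => simp at h
    | cons a as =>
      have h' : as.length = os.length := by simpa using h
      simp only [List.length_cons]
      rw [List.range_succ_eq_map]
      simp only [List.zip_cons_cons, List.filter_cons, List.map_cons, List.map_map,
        List.getD_cons_zero]
      by_cases ho : o = "+" ∨ o = "*"
      · have hb : (o == "+" || o == "*") = true := by
          rcases ho with h1 | h1 <;> simp [h1]
        rw [if_pos ho]
        simp only [hb, if_true]
        rw [List.map_cons, List.sum_cons, ih as h']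
        rfl
      · have hb : (o == "+" || o == "*") = false := by
          simp only [not_or] at ho; simp [ho.1, ho.2]
        rw [if_neg ho]
        simp only [hb, Bool.false_eq_true, if_false]
        rw [ih as h']
        simp only [List.sum_cons, zero_add]
        refine congrArg List.sum (List.map_congr_left ?_)
        intro j hj
        simp

-- A's per-column value equals the column fold that B's accumulator computes, summed only
-- over '+'/'*' columns
theorem colVal_eq_fold (op : String) (cells : List Int) :
    colVal op cells
      = (if op = "+" ∨ op = "*" then
          cells.foldl (fun x y => stepCell op x y) (if op = "+" then 0 else 1) else 0) := by
  by_cases h1 : op = "+"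
  · simp [colVal, stepCell, h1, List.sum_eq_foldl]
  · by_cases h2 : op = "*"
    · simp [colVal, stepCell, h1, h2]
    · simp [colVal, h1, h2]

-- the minimum-length bound: every row is at least as long as min(len(r) for r in rows)
theorem min?_getD_le (l : List Nat) (x : Nat) (hx : x ∈ l) : ((l.min?).getD 0) ≤ x := by
  cases h : l.min? with
  | none => rw [List.min?_eq_none_iff] at h; subst h; simp at hx
  | some m =>
    have := (List.min?_eq_some_iff).mp h
    simpa using this.2 x hx

-- the core equivalence over the parsed rows
theorem core_eq (rows : List (List String)) :
    (pyZipStar rows).foldl (fun grand_total column =>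
        let operator := (column.getLast?).getD ""
        let numbers := column.dropLast.map (fun n => (PySem.Int.ofStr? n).getD 0)
        if operator = "+" then grand_total + numbers.sum
        else if operator = "*" then grand_total + numbers.foldl (· * ·) 1
        else grand_total) 0
    = (let opRow := (rows.getLast?).getD []
       let numRows := rows.dropLast
       let m := ((rows.map List.length).min?).getD 0
       let ops := opRow.take m
       let init := ops.map (fun op => if op = "+" then (0 : Int) else 1)
       let acc := numRows.foldl
          (fun a row => stepRow a ((row.take m).map (fun x => (PySem.Int.ofStr? x).getD 0)) ops) init
       (((acc.zip ops).filter (fun p => p.2 == "+" || p.2 == "*")).map Prod.fst).sum) := by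
  simp only []
  rcases List.eq_nil_or_concat rows with rfl | ⟨nr, opR, rfl⟩
  · rfl
  · simp only [List.concat_eq_append, List.getLast?_concat, Option.getD_some,
      List.dropLast_concat]
    set parse : String → Int := fun x => (PySem.Int.ofStr? x).getD 0 with hparse
    set m := (((nr ++ [opR]).map List.length).min?).getD 0 with hmdef
    have hm_op : m ≤ opR.length := min?_getD_le _ _ (by simp)
    have hm_row : ∀ r ∈ nr, m ≤ r.length := by
      intro r hr
      exact min?_getD_le _ _ (by simp; exact Or.inl ⟨r, hr, rfl⟩)
    set ops := opR.take m with hops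
    have hops_len : ops.length = m := by simp [hops]; omega
    set init := ops.map (fun op => if op = "+" then (0 : Int) else 1) with hinit
    have hinit_len : init.length = ops.length := by rw [hinit, List.length_map]
    set vrows := nr.map (fun row => (row.take m).map parse) with hvrows
    have hvlen : ∀ v ∈ vrows, init.length ≤ v.length := by
      intro v hv
      rw [hvrows] at hv
      obtain ⟨r, hr, rfl⟩ := List.mem_map.mp hv
      rw [hinit_len, hops_len, List.length_map, List.length_take]
      exact le_min le_rfl (hm_row r hr)
    have hopj : ∀ j, j < m → ops.getD j "" = opR.getD j "" := by
      intro j hj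
      simp [hops, List.getD_eq_getElem?_getD, hj]
    have hfold : nr.foldl (fun a row => stepRow a ((row.take m).map parse) ops) init
        = vrows.foldl (fun a vals => stepRow a vals ops) init := by
      rw [hvrows, List.foldl_map]
    rw [hfold]
    set acc := vrows.foldl (fun a vals => stepRow a vals ops) init with hacc
    have hacc_len : acc.length = m := by
      rw [hacc, stepRows_length vrows init ops (by rw [hinit_len]) hvlen, hinit_len, hops_len]
    have hacc_getD : ∀ j, j < m →
        acc.getD j 0 = (nr.map (fun r => parse (r.getD j ""))).foldl
          (fun x y => stepCell (opR.getD j "") x y)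
          (if opR.getD j "" = "+" then (0 : Int) else 1) := by
      intro j hj
      have hj' : j < init.length := by rw [hinit_len, hops_len]; exact hj
      rw [hacc, stepRows_getD vrows init ops j (by rw [hinit_len]) hvlen hj']
      have hinitj : init.getD j 0 = (if opR.getD j "" = "+" then (0 : Int) else 1) := by
        rw [← hopj j hj, hinit]
        have hjo : j < ops.length := by rw [hops_len]; exact hj
        simp [List.getD_eq_getElem?_getD, hjo]
      have hmapeq : vrows.map (fun v => v.getD j 0) = nr.map (fun r => parse (r.getD j "")) := by
        rw [hvrows, List.map_map]
        apply List.map_congr_left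
        intro r hr
        have hjr : j < r.length := lt_of_lt_of_le hj (hm_row r hr)
        simp [List.getD_eq_getElem?_getD, hj, hjr]
      rw [hopj j hj, hinitj, hmapeq]
    have hbody : (fun (grand_total : Int) (column : List String) =>
        if (column.getLast?).getD "" = "+" then grand_total + (column.dropLast.map parse).sum
        else if (column.getLast?).getD "" = "*" then
          grand_total + (column.dropLast.map parse).foldl (· * ·) 1
        else grand_total)
      = fun grand_total column =>
          grand_total + colVal ((column.getLast?).getD "") (column.dropLast.map parse) := by
      funext gt c
      simp only [colVal]
      split_ifs <;> simp
    rw [zipFilterSum ops acc (by rw [hacc_len, hops_len])]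
    rw [hbody, PySem.List.foldl_add, zero_add]
    rw [pyZipStar, ← hmdef, List.map_map, hops_len]
    apply congrArg List.sum
    apply List.map_congr_left
    intro j hjm
    have hj : j < m := List.mem_range.mp hjm
    simp only [Function.comp]
    rw [List.map_append, List.map_singleton, List.getLast?_concat, Option.getD_some,
      List.dropLast_concat, List.map_map]
    rw [colVal_eq_fold, hopj j hj, hacc_getD j hj]
    rfl

-- ===== VERDICT (by name: the statement is the Claim_ definition above) =====
theorem solve_spec : Claim_equal_solve := by
  intro t _ _
  unfold Spec_solve solve solve_alt
  exact core_eq _
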